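-- pv_equiv track=rewrite | github.com/CXY1369/Job-Autopilot | autojobagent/core/macro_tasks.py | _match_option_text
-- ===== SOURCE A (Python) =====
-- def _norm(text: str | None) -> str:
--     return " ".join((text or "").split()).strip().lower()
--
-- def _match_option_text(options: list[str], wanted: str) -> str | None:
--     w = _norm(wanted)
--     if not w:
--         return None
--     exact = [opt for opt in options if _norm(opt) == w]
--     if exact:
--         return exact[0]
--     starts = [opt for opt in options if _norm(opt).startswith(w)]
--     if starts:
--         return starts[0]
--     contains = [opt for opt in options if w in _norm(opt) or _norm(opt) in w]
--     if contains:
--         return contains[0]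
--     return None
-- ===== SOURCE B (Python) =====
-- def _norm(text):
--     return " ".join((text or "").split()).strip().lower()
--
-- def _match_option_text(options, wanted):
--     w = _norm(wanted)
--     if not w:
--         return None
--     exact = starts = contains = None
--     for opt in options:
--         n = _norm(opt)
--         if exact is None and n == w:
--             exact = opt
--         if starts is None and n.startswith(w):
--             starts = opt
--         if contains is None and (w in n or n in w):
--             contains = opt
--     if exact is not None:
--         return exact
--     if starts is not None:
--         return starts
--     if contains is not None:
--         return contains
--     return None
-- ===== Notes on version B (the rewrite author's own statement) =====
-- stated objective: simpler
-- what changed: Replaces A's three full list-comprehension passes (exact, prefix, substring), each of which re-normalizes every option, by one pass over options that normalizes each option once and records the first hit of each of the three priority levels in None-sentinels, then returns by priority.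
import Mathlib
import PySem

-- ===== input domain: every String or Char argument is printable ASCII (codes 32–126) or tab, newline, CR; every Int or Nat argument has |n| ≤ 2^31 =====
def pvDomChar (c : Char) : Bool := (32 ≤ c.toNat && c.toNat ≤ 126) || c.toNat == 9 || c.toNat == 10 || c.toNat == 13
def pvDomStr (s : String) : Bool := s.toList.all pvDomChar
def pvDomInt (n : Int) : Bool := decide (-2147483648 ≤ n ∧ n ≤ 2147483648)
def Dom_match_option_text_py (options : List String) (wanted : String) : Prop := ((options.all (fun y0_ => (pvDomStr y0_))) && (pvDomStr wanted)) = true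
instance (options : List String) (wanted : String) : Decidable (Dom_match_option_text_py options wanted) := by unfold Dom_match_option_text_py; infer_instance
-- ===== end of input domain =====

-- ===== PORT A =====
-- B does one pass with three first-hit sentinels instead of A's three filtering passes (objective: simpler); same return value.
def pvNorm (text : String) : String :=
  PySem.Str.lower (PySem.Str.strip (PySem.Str.join " " (PySem.Str.split₀ text)))

def match_option_text_py (options : List String) (wanted : String) : Option String :=
  let w := pvNorm wanted
  if w = "" then none
  else -- 'exact', 'starts', 'contains' in order, first element of each filter
    match options.filter (fun opt => pvNorm opt == w) with
    | o :: _ => some o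
    | [] =>
      match options.filter (fun opt => PySem.Str.startswith (pvNorm opt) w) with
      | o :: _ => some o
      | [] =>
        match options.filter (fun opt => PySem.Str.isIn w (pvNorm opt) || PySem.Str.isIn (pvNorm opt) w) with
        | o :: _ => some o
        | [] => none

-- ===== PORT B =====
-- 'if sentinel is None and cond: sentinel = opt'
def pvUpd (acc : Option String) (hit : Bool) (opt : String) : Option String :=
  if acc.isNone && hit then some opt else acc

-- the single loop of Source B, carrying the three sentinels (exact, starts, contains)
def pvScan (w : String) : List String → Option String × Option String × Option String → Option String × Option String × Option String
  | [], s => s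
  | opt :: rest, (e, st, c) =>
    let n := pvNorm opt
    pvScan w rest
      (pvUpd e (n == w) opt,
       pvUpd st (PySem.Str.startswith n w) opt,
       pvUpd c (PySem.Str.isIn w n || PySem.Str.isIn n w) opt)

def match_option_text_py_alt (options : List String) (wanted : String) : Option String :=
  let w := pvNorm wanted
  if w = "" then none
  else
    match pvScan w options (none, none, none) with
    | (some e, _, _) => some e
    | (none, some st, _) => some st
    | (none, none, some c) => some c
    | (none, none, none) => none

-- ===== PRECONDITION & SPEC =====
def Spec_match_option_text_py (options : List String) (wanted : String) (out : Option String) : Prop := out = match_option_text_py_alt options wanted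
instance (options : List String) (wanted : String) (out : Option String) : Decidable (Spec_match_option_text_py options wanted out) := by unfold Spec_match_option_text_py; infer_instance

-- ===== CLAIM (what is proved, stated in full; the proofs are below) =====
def Claim_equal_match_option_text_py : Prop := ∀ (options : List String) (wanted : String), Dom_match_option_text_py options wanted → Spec_match_option_text_py options wanted (match_option_text_py options wanted)

-- ===== LEMMAS AND PROOFS =====
theorem pvUpd_head (a : Option String) (p : String → Bool) (opt : String) (rest : List String) :
    (pvUpd a (p opt) opt).orElse (fun _ => (rest.filter p).head?) =
      a.orElse (fun _ => ((opt :: rest).filter p).head?) := by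
  cases a with
  | some v => simp [pvUpd]
  | none => by_cases h : p opt = true <;> simp [pvUpd, h]

theorem pvScan_eq (w : String) (l : List String) (e st c : Option String) :
    pvScan w l (e, st, c) =
      (e.orElse fun _ => (l.filter (fun opt => pvNorm opt == w)).head?,
       st.orElse fun _ => (l.filter (fun opt => PySem.Str.startswith (pvNorm opt) w)).head?,
       c.orElse fun _ => (l.filter (fun opt => PySem.Str.isIn w (pvNorm opt) || PySem.Str.isIn (pvNorm opt) w)).head?) := by
  induction l generalizing e st c with
  | nil => cases e <;> cases st <;> cases c <;> simp [pvScan]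
  | cons opt rest ih =>
    simp only [pvScan, ih]
    refine Prod.ext ?_ (Prod.ext ?_ ?_) <;> simp only
    · exact pvUpd_head e (fun x => pvNorm x == w) opt rest
    · exact pvUpd_head st (fun x => PySem.Str.startswith (pvNorm x) w) opt rest
    · exact pvUpd_head c (fun x => PySem.Str.isIn w (pvNorm x) || PySem.Str.isIn (pvNorm x) w) opt rest

-- ===== VERDICT (by name: the statement is the Claim_ definition above) =====
theorem match_option_text_py_spec : Claim_equal_match_option_text_py := by
  intro options wanted _
  unfold Spec_match_option_text_py match_option_text_py match_option_text_py_alt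
  by_cases hw : pvNorm wanted = ""
  · simp [hw]
  · simp only [hw, reduceIte, pvScan_eq, Option.orElse_none]
    cases h1 : options.filter (fun opt => pvNorm opt == pvNorm wanted) with
    | cons o t => simp
    | nil =>
      cases h2 : options.filter (fun opt => PySem.Str.startswith (pvNorm opt) (pvNorm wanted)) with
      | cons o t => simp
      | nil =>
        cases h3 : options.filter (fun opt => PySem.Str.isIn (pvNorm wanted) (pvNorm opt) || PySem.Str.isIn (pvNorm opt) (pvNorm wanted)) with
        | cons o t => simp
        | nil => simp
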